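-- pv_equiv track=rewrite | github.com/VolkovIlia/pycatalicism | furnace/owen_protocol.py | _get_command_id
-- ===== SOURCE A (Python) =====
-- def _get_command_id(command:str) -> list[int]:
--     """
--     Encrypt command name to command id according to owen protocol.
--
--     parameters
--     ----------
--     command:str
--         String representation of command
--
--     returns
--     -------
--     command_id:list[int]
--         List of 4 bytes representing encrypted command id according to owen protocol
--
--     raises
--     ------
--     FurnaceException
--         If illegal char encountered in command name or if command id has more than 4 bytes
--     """
--     command_id = []
--     command_cap = command.upper()
--     for i in range(len(command_cap)):
--         if command_cap[i] == '.':
--             continue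
--         elif command_cap[i].isdecimal():
--             ch_id = ord(command_cap[i]) - ord('0')
--         elif command_cap[i].isalpha():
--             ch_id = ord(command_cap[i]) - ord('A') + 10
--         elif command_cap[i] == '-':
--             ch_id = 36
--         elif command_cap[i] == '_':
--             ch_id = 37
--         elif command_cap[i] == '/':
--             ch_id = 38
--         else:
--             raise FurnaceException(f'Illegal char in command name: {command_cap[i]}')
--         ch_id = ch_id * 2
--         if i < len(command_cap) - 1 and command_cap[i+1] == '.':
--             ch_id = ch_id + 1
--         command_id.append(ch_id)
--     if len(command_id) > 4:
--         raise FurnaceException('Command ID cannot contain more than 4 characters!')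
--     if len(command_id) < 4:
--         for i in range(4 - len(command_id)):
--             command_id.append(78)
--     return command_id
-- ===== SOURCE B (Python) =====
-- class FurnaceException(Exception):
--     pass
--
-- def _get_command_id(command: str) -> list[int]:
--     # staged: split on '.', encode each token, bump the last byte of every
--     # token that is followed by a dot, then concatenate and pad to 4 with 78
--     def code(ch):
--         if ch.isdecimal():
--             return ord(ch) - ord('0')
--         if ch.isalpha():
--             return ord(ch) - ord('A') + 10
--         if ch == '-':
--             return 36
--         if ch == '_':
--             return 37
--         if ch == '/':
--             return 38
--         raise FurnaceException(f'Illegal char in command name: {ch}')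
--     parts = command.upper().split('.')
--     ids = []
--     for k, part in enumerate(parts):
--         vals = [2 * code(c) for c in part]
--         if vals and k < len(parts) - 1:
--             vals[-1] += 1
--         ids.extend(vals)
--     if len(ids) > 4:
--         raise FurnaceException('Command ID cannot contain more than 4 characters!')
--     return ids + [78] * (4 - len(ids))
-- ===== Notes on version B (the rewrite author's own statement) =====
-- stated objective: alternative
-- what changed: Replaces A's indexed loop with per-character lookahead by a staged pipeline: split the uppercased command on '.', encode each token separately, bump the last byte of every token that is followed by a dot, then concatenate and pad.
import Mathlib
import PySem

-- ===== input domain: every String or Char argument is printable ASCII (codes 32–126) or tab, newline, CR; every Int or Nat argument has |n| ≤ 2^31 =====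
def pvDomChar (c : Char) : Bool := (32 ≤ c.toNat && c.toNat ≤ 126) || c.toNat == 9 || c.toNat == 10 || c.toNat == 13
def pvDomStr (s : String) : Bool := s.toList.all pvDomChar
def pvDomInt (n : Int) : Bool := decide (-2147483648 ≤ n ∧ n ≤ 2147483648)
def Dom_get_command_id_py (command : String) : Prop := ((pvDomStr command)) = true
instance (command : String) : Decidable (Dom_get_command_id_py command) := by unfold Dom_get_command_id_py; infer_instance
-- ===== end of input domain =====

-- B replaces A's indexed loop with a one-character lookahead by a staged pipeline
-- (split on '.', encode each token, bump the last byte of non-final tokens, concatenate, pad);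
-- objective: alternative decomposition, not faster.

-- ===== PORT A =====
-- classification chain of A's elif ladder ('.' is handled by the loop itself);
-- none = the branch where the Python raises FurnaceException (excluded by Pre_)
def chId_A (c : Char) : Option Int :=
  if PySem.Chars.isdigit c then some ((c.toNat : Int) - ('0'.toNat : Int))
  else if PySem.Chars.isalpha c then some ((c.toNat : Int) - ('A'.toNat : Int) + 10)
  else if c = '-' then some 36
  else if c = '_' then some 37
  else if c = '/' then some 38
  else none

-- A's 'for i in range(len(cap))' with lookahead cap[i+1], as the obvious structural
-- recursion: 'i < len-1 and cap[i+1] == "."' becomes 'rest.head? = some '.''.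
-- On the raise branch the port returns the accumulator (Pre_ excludes those inputs).
def loopA (cs : List Char) (acc : List Int) : List Int :=
  match cs with
  | [] => acc
  | c :: rest =>
    if c = '.' then loopA rest acc
    else
      match chId_A c with
      | none => acc
      | some v =>
        let v := v * 2
        let v := if rest.head? = some '.' then v + 1 else v
        loopA rest (acc ++ [v])

def get_command_id_py (command : String) : List Int :=
  let cap := PySem.Chars.upper command.toList
  let ids := loopA cap []
  if ids.length > 4 then []   -- Python raises FurnaceException here; excluded by Pre_
  else (List.range (4 - ids.length)).foldl (fun acc _ => acc ++ [78]) ids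

-- ===== PORT B =====
-- Source B's 'code' helper; none = the raise branch (excluded by Pre_)
def codeB (c : Char) : Option Int :=
  if PySem.Chars.isdigit c then some ((c.toNat : Int) - ('0'.toNat : Int))
  else if PySem.Chars.isalpha c then some ((c.toNat : Int) - ('A'.toNat : Int) + 10)
  else if c = '-' then some 36
  else if c = '_' then some 37
  else if c = '/' then some 38
  else none

-- vals[-1] += 1
def bumpLast : List Int → List Int
  | [] => []
  | [x] => [x + 1]
  | x :: rest => x :: bumpLast rest

-- [2 * code(c) for c in part]; none if code raises anywhere in the token
def partVals : List Char → Option (List Int)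
  | [] => some []
  | c :: rest =>
    match codeB c, partVals rest with
    | some v, some vs => some (2 * v :: vs)
    | _, _ => none

-- the 'for k, part in enumerate(parts)' stage: every non-final nonempty token
-- gets its last byte bumped, tokens are concatenated in order
def buildIds : List (List Char) → Option (List Int)
  | [] => some []
  | [p] => partVals p
  | p :: rest =>
    match partVals p, buildIds rest with
    | some vs, some tl => some ((if vs ≠ [] then bumpLast vs else vs) ++ tl)
    | _, _ => none

def get_command_id_py_alt (command : String) : List Int :=
  match buildIds ((PySem.Chars.upper command.toList).splitOn '.') with
  | none => []   -- Source B raises FurnaceException here; excluded by Pre_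
  | some ids =>
    if ids.length > 4 then []   -- Source B raises FurnaceException here; excluded by Pre_
    else ids ++ List.replicate (4 - ids.length) 78

-- ===== PRECONDITION & SPEC =====
def legalChar (c : Char) : Bool :=
  PySem.Chars.isdigit c || PySem.Chars.isalpha c ||
    c == '-' || c == '_' || c == '/' || c == '.'

-- Pre_ = exactly the inputs where the Python A returns: every character of
-- command.upper() is legal (else A raises FurnaceException) and at most 4 of them
-- are non-dots (else A raises 'more than 4 characters').
def Pre_get_command_id_py (command : String) : Prop :=
  (PySem.Chars.upper command.toList).all legalChar = true ∧
  (PySem.Chars.upper command.toList).countP (fun c => !(c == '.')) ≤ 4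

instance (command : String) : Decidable (Pre_get_command_id_py command) := by
  unfold Pre_get_command_id_py; infer_instance

def pvWitness_get_command_id_py : String := "a.1/"

def Spec_get_command_id_py (command : String) (out : List Int) : Prop := out = get_command_id_py_alt command
instance (command : String) (out : List Int) : Decidable (Spec_get_command_id_py command out) := by unfold Spec_get_command_id_py; infer_instance

-- ===== CLAIM (what is proved, stated in full; the proofs are below) =====
def Claim_equal_get_command_id_py : Prop := ∀ (command : String), Dom_get_command_id_py command → Pre_get_command_id_py command → Spec_get_command_id_py command (get_command_id_py command)

-- ===== LEMMAS AND PROOFS =====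

-- the common reference function both ports are reduced to
def fIds : List Char → List Int
  | [] => []
  | c :: rest =>
    if c = '.' then fIds rest
    else (if rest.head? = some '.' then 2 * (chId_A c).getD 0 + 1 else 2 * (chId_A c).getD 0) :: fIds rest

theorem chId_A_legal {c : Char} (h : legalChar c = true) (hc : c ≠ '.') :
    ∃ v, chId_A c = some v := by
  unfold chId_A
  split_ifs with h1 h2 h3 h4 h5
  · exact ⟨_, rfl⟩
  · exact ⟨_, rfl⟩
  · exact ⟨_, rfl⟩
  · exact ⟨_, rfl⟩
  · exact ⟨_, rfl⟩
  · exfalso; simp [legalChar, h1, h2, h3, h4, h5, hc] at h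

theorem loopA_eq_fIds (cs : List Char) : ∀ acc : List Int,
    (∀ c ∈ cs, legalChar c = true) → loopA cs acc = acc ++ fIds cs := by
  induction cs with
  | nil => intro acc _; simp [loopA, fIds]
  | cons c rest ih =>
    intro acc hleg
    by_cases hc : c = '.'
    · subst hc
      simp only [loopA, fIds, if_pos rfl]
      exact ih acc (fun x hx => hleg x (List.mem_cons_of_mem _ hx))
    · obtain ⟨v, hv⟩ := chId_A_legal (hleg c List.mem_cons_self) hc
      simp only [loopA, fIds, if_neg hc, hv]
      rw [ih _ (fun x hx => hleg x (List.mem_cons_of_mem _ hx))]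
      by_cases hh : rest.head? = some '.'
      · simp [hh, hv, mul_comm]
      · simp [hh, hv, mul_comm]

theorem splitOn_dot_ne_nil (cs : List Char) : cs.splitOn '.' ≠ [] :=
  List.splitOnP_ne_nil _ cs

theorem buildIds_eq_fIds (cs : List Char) :
    (∀ c ∈ cs, legalChar c = true) → buildIds (cs.splitOn '.') = some (fIds cs) := by
  induction cs with
  | nil => intro _; simp [List.splitOn, List.splitOnP_nil, buildIds, partVals, fIds]
  | cons c rest ih =>
    intro hleg
    have hlegr : ∀ x ∈ rest, legalChar x = true :=
      fun x hx => hleg x (List.mem_cons_of_mem _ hx)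
    have ihr := ih hlegr
    by_cases hc : c = '.'
    · subst hc
      have hsplit : (('.' :: rest).splitOn '.') = [] :: rest.splitOn '.' := by
        simp [List.splitOn, List.splitOnP_cons]
      rw [hsplit]
      obtain ⟨p, ps, hps⟩ : ∃ p ps, rest.splitOn '.' = p :: ps := by
        cases h : rest.splitOn '.' with
        | nil => exact absurd h (splitOn_dot_ne_nil rest)
        | cons p ps => exact ⟨p, ps, rfl⟩
      rw [hps] at ihr ⊢
      simp only [fIds, if_pos rfl]
      simp only [buildIds, ihr]
      cases hpv : partVals [] with
      | none => simp [partVals] at hpv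
      | some vs =>
        simp only [partVals, Option.some.injEq] at hpv
        subst hpv
        simp [ihr]
    · obtain ⟨v, hv⟩ := chId_A_legal (hleg c List.mem_cons_self) hc
      have hvB : codeB c = some v := hv
      have hstep : ∀ p : List Char, partVals (c :: p) =
          (match codeB c, partVals p with
           | some v, some vs => some (2 * v :: vs)
           | _, _ => none) := fun _ => rfl
      cases rest with
      | nil =>
        simp [List.splitOn, List.splitOnP_cons, List.splitOnP_nil, hc, buildIds, partVals,
          hvB, hv, fIds, mul_comm]
      | cons d r =>
        by_cases hd : d = '.'
        · subst hd
          have hsplit : ((c :: '.' :: r).splitOn '.') = [c] :: r.splitOn '.' := by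
            simp [List.splitOn, List.splitOnP_cons, hc]
          obtain ⟨q, qs, hqs⟩ : ∃ q qs, r.splitOn '.' = q :: qs := by
            cases h : r.splitOn '.' with
            | nil => exact absurd h (splitOn_dot_ne_nil r)
            | cons q qs => exact ⟨q, qs, rfl⟩
          have hqs' : List.splitOnP (fun x => x == '.') r = q :: qs := hqs
          have hsplitr : (('.' :: r).splitOn '.') = [] :: q :: qs := by
            simp [List.splitOn, List.splitOnP_cons, hqs']
          rw [hsplitr] at ihr
          -- buildIds ([] :: q :: qs) = buildIds (q :: qs)
          have hbq : buildIds (q :: qs) = some (fIds ('.' :: r)) := by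
            cases h : buildIds (q :: qs) with
            | none => simp [buildIds, partVals, h] at ihr
            | some tl =>
              simp [buildIds, partVals, h] at ihr
              simp [ihr]
          rw [hsplit, hqs]
          simp only [buildIds, partVals, hvB, hbq]
          have : fIds (c :: '.' :: r) = (2 * v + 1) :: fIds ('.' :: r) := by
            simp [fIds, hc, hv]
          simp [this, bumpLast]
        · have hsplit0 : ∃ p₂ ps, ((d :: r).splitOn '.') = (d :: p₂) :: ps := by
            cases h : r.splitOn '.' with
            | nil => exact absurd h (splitOn_dot_ne_nil r)
            | cons q qs =>
              have h' : List.splitOnP (fun x => x == '.') r = q :: qs := h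
              exact ⟨q, qs, by simp [List.splitOn, List.splitOnP_cons, hd, h']⟩
          obtain ⟨p₂, ps, hps⟩ := hsplit0
          have hsplit : ((c :: d :: r).splitOn '.') = (c :: d :: p₂) :: ps := by
            have hps' : List.splitOnP (fun x => x == '.') (d :: r) = (d :: p₂) :: ps := hps
            simp [List.splitOn, List.splitOnP_cons, hc, hps']
          rw [hps] at ihr
          rw [hsplit]
          have hfid : fIds (c :: d :: r) = 2 * v :: fIds (d :: r) := by
            simp [fIds, hc, hd, hv]
          cases ps with
          | nil =>
            -- single token: partVals directly
            simp only [buildIds] at ihr ⊢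
            rw [hstep (d :: p₂), hvB, ihr, hfid]
          | cons z zs =>
            -- extract partVals (d :: p₂) and buildIds (z :: zs) from ihr
            cases hpv : partVals (d :: p₂) with
            | none => simp [buildIds, hpv] at ihr
            | some vs =>
              cases hbz : buildIds (z :: zs) with
              | none => simp [buildIds, hpv, hbz] at ihr
              | some tl =>
                simp only [buildIds, hpv, hbz, Option.some.injEq] at ihr
                -- vs is a cons (token d::p₂ nonempty)
                obtain ⟨w, vs', hvs⟩ : ∃ w vs', vs = w :: vs' := by
                  simp only [partVals] at hpv
                  cases hcd : codeB d with
                  | none => simp [hcd] at hpv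
                  | some wd =>
                    cases hpr : partVals p₂ with
                    | none => simp [hcd, hpr] at hpv
                    | some vr =>
                      simp [hcd, hpr] at hpv
                      exact ⟨_, _, hpv.symm⟩
                subst hvs
                simp only [ne_eq, reduceCtorEq, not_false_eq_true, if_pos] at ihr
                have hpc : partVals (c :: d :: p₂) = some (2 * v :: w :: vs') := by
                  rw [hstep (d :: p₂), hvB, hpv]
                simp only [buildIds, hpc, hbz, hfid, ← ihr]
                simp [bumpLast]

theorem pad_eq (ids : List Int) (n : Nat) :
    (List.range n).foldl (fun acc _ => acc ++ [78]) ids = ids ++ List.replicate n (78 : Int) := by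
  induction n with
  | zero => simp
  | succ m ih => simp [List.range_succ, ih, List.replicate_succ']

-- ===== VERDICT (by name: the statement is the Claim_ definition above) =====
theorem get_command_id_py_spec : Claim_equal_get_command_id_py := by
  intro command _hdom hpre
  obtain ⟨hleg, _hcnt⟩ := hpre
  unfold Spec_get_command_id_py get_command_id_py get_command_id_py_alt
  have hA : loopA (PySem.Chars.upper command.toList) [] = fIds (PySem.Chars.upper command.toList) := by
    simpa using loopA_eq_fIds (PySem.Chars.upper command.toList) []
      (fun c hc => List.all_eq_true.mp hleg c hc)
  have hB := buildIds_eq_fIds (PySem.Chars.upper command.toList)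
    (fun c hc => List.all_eq_true.mp hleg c hc)
  simp only [hA, hB]
  split_ifs with h
  · rfl
  · exact pad_eq _ _
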